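-- pv_equiv track=rewrite | github.com/nazmulcuet11/acm | InterviewBit/hashing/longest-subarray-length.py | solve
-- ===== SOURCE A (Python) =====
-- def solve(A):
--     sum = 0
--     hash = {}
--     max_len = 0
--
--     for idx, v in enumerate(A):
--         if v == 0:
--             sum -= 1
--         else:
--             sum += 1
--
--         if sum == 1:
--             max_len = idx + 1
--         else:
--             if sum not in hash:
--                 hash[sum] = idx
--             if sum - 1 in hash:
--                 l = hash[sum - 1]
--                 # l] to idx] sum == 1
--                 max_len = max(max_len, idx - l)
--     return max_len
-- ===== SOURCE B (Python) =====
-- def solve(A):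
--     n = len(A)
--     max_len = 0
--     for i in range(n):
--         s = 0
--         for j in range(i, n):
--             s += -1 if A[j] == 0 else 1
--             if s == 1:
--                 max_len = max(max_len, j - i + 1)
--     return max_len
-- ===== Notes on version B (the rewrite author's own statement) =====
-- stated objective: simpler
-- what changed: Replaces the prefix-sum hash-map single pass with a plain brute-force nested scan (for every start index walk forward keeping a running signed sum, recording j-i+1 whenever the sum is 1), which also fixes A's missed subarrays.
-- intended difference: On inputs where some subarray with signed sum 1 ending at prefix-sum 2 is strictly longer than every such subarray ending at a prefix-sum other than 2 (A never stores key 1 in its hash, e.g. [1,1,1,0]), A returns only the best subarray not ending at prefix 2 (1 for the example) while B returns the true maximum length (3), which is the intended answer to 'longest subarray with one more 1 than 0'. — e.g. on solve([1, 1, 1, 0]): A returns 1, B returns 3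
import Mathlib
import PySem

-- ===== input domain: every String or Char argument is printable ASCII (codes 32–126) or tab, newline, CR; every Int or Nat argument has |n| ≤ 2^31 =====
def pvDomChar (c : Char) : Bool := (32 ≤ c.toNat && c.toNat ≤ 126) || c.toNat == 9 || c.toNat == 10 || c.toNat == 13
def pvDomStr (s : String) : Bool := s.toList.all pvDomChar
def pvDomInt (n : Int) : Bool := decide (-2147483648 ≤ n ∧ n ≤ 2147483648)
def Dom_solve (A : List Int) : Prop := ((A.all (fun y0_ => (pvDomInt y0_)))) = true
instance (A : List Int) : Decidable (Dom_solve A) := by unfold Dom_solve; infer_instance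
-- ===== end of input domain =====

-- B replaces A's prefix-sum/hash-map pass by a brute-force nested scan (simpler, O(n^2));
-- it also returns the intended maximum on the D_solve corner inputs that A misses.

-- ===== PORT A =====
-- step of A's loop: state (sum, hash, max_len), element (idx, v)
def solveStep (st : Int × PySem.Dict Int Int × Int) (p : Int × Int) : Int × PySem.Dict Int Int × Int :=
  let s := if p.2 = 0 then st.1 - 1 else st.1 + 1
  if s = 1 then (s, st.2.1, p.1 + 1)
  else
    let h := if PySem.Dict.get? st.2.1 s = none then PySem.Dict.insert st.2.1 s p.1 else st.2.1
    match PySem.Dict.get? h (s - 1) with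
    | some l => (s, h, max st.2.2 (p.1 - l))
    | none => (s, h, st.2.2)

def solve (A : List Int) : Int :=
  ((PySem.List.enumerate A).foldl solveStep (0, PySem.Dict.empty, 0)).2.2

-- ===== PORT B =====
-- inner-loop step of B: state (s, max_len), running index j, start index i
def stepJ (A : List Int) (i : Int) (st : Int × Int) (j : Int) : Int × Int :=
  let s := st.1 + if PySem.List.pyGetD A j 0 = 0 then -1 else 1
  (s, if s = 1 then max st.2 (j - i + 1) else st.2)

def solve_alt (A : List Int) : Int :=
  (PySem.List.pyRange 0 A.length).foldl
    (fun maxLen i => ((PySem.List.pyRange i A.length).foldl (stepJ A i) (0, maxLen)).2) 0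

-- ===== PRECONDITION & SPEC =====
-- the list of signed prefix sums (0 ↦ -1, anything else ↦ +1) of A, built once
def pre (A : List Int) : List Int := List.scanl (· + ·) 0 (A.map (if · = 0 then -1 else 1))

-- On inputs where some subarray with signed sum 1 ending at prefix-sum 2 is strictly longer than every
-- such subarray ending elsewhere, A (which never stores key 1 in its hash) returns only the shorter
-- maximum while B returns the true longest length, the intended answer.
def D_solve (A : List Int) : Prop :=
  ∃ y ∈ (pre A).zipIdx, y.1 = 1 ∧ (∀ z ∈ (pre A).zipIdx, z.1 = 1 → y.2 ≤ z.2) ∧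
    ∃ x ∈ (pre A).zipIdx, x.1 = 2 ∧ y.2 < x.2 ∧ (∀ z ∈ (pre A).zipIdx, z.1 = 2 → y.2 < z.2 → z.2 ≤ x.2) ∧
      ∀ p ∈ (pre A).zipIdx, p.1 ≠ 2 → ∀ q ∈ (pre A).zipIdx, q.2 < p.2 → p.1 - q.1 = 1 →
        p.2 - q.2 < x.2 - y.2
instance (A : List Int) : Decidable (D_solve A) := by unfold D_solve; infer_instance

def Spec_solve (A : List Int) (out : Int) : Prop := ¬ D_solve A → out = solve_alt A
instance (A : List Int) (out : Int) : Decidable (Spec_solve A out) := by unfold Spec_solve; infer_instance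

def pvDiffWitness_solve : List Int := [1, 1, 1, 0]
def pvDiffWitnessOut_solve : Int × Int := (1, 3)

-- ===== CLAIM (what is proved, stated in full; the proofs are below) =====
def Claim_unchanged_solve : Prop := ∀ (A : List Int), Dom_solve A → Spec_solve A (solve A)
def Claim_changed_solve : Prop := Dom_solve (pvDiffWitness_solve) ∧ D_solve (pvDiffWitness_solve) ∧ solve (pvDiffWitness_solve) = pvDiffWitnessOut_solve.1 ∧ solve_alt (pvDiffWitness_solve) = pvDiffWitnessOut_solve.2 ∧ pvDiffWitnessOut_solve.1 ≠ pvDiffWitnessOut_solve.2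
def Claim_exact_solve : Prop := ∀ (A : List Int), Dom_solve A → D_solve A → solve A ≠ solve_alt A

-- ===== LEMMAS AND PROOFS =====

-- ---- prefix sums ----
-- psum A k = the signed prefix sum of the first k elements (the k-th entry of pre A)
def psum (A : List Int) k := ((A.take k).map (if · = 0 then -1 else 1)).sum

lemma psum_zero (A : List Int) : psum A 0 = 0 := rfl

lemma psum_succ (A : List Int) (k : Nat) (h : k < A.length) :
    psum A (k + 1) = psum A k + (if A.getD k 0 = 0 then -1 else 1) := by
  have ht : A.take (k + 1) = A.take k ++ [A[k]] := by
    rw [List.take_add_one, List.getElem?_eq_getElem h]; rfl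
  have hd : A.getD k 0 = A[k] := by simp [List.getD_eq_getElem?_getD, List.getElem?_eq_getElem h]
  unfold psum
  rw [ht, hd, List.map_append, List.sum_append]
  simp

lemma scanl_sum (l : List Int) : ∀ c : Int,
    List.scanl (· + ·) c l = (List.range (l.length + 1)).map (fun k => c + (l.take k).sum) := by
  induction l with
  | nil => intro c; simp [List.scanl_nil, List.range_one]
  | cons a t ih =>
      intro c
      rw [List.scanl_cons, ih (c + a), List.length_cons]
      conv_rhs => rw [List.range_succ_eq_map]
      simp only [List.map_cons, List.map_map, List.cons.injEq, List.take_zero, List.sum_nil,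
        add_zero, true_and]
      apply List.map_congr_left
      intro k _
      simp only [Function.comp, List.take_succ_cons, List.sum_cons]
      ring

lemma pre_eq (A : List Int) : pre A = (List.range (A.length + 1)).map (fun k => psum A k) := by
  unfold pre
  rw [scanl_sum]
  simp only [List.length_map]
  apply List.map_congr_left
  intro k _
  rw [← List.map_take]
  unfold psum
  ring

lemma mem_preZ (A : List Int) (x : Int × Nat) :
    x ∈ (pre A).zipIdx ↔ x.2 ≤ A.length ∧ x.1 = psum A x.2 := by
  rw [List.mem_zipIdx_iff_getElem?, pre_eq]
  constructor
  · intro h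
    obtain ⟨hlt, hx⟩ := List.getElem?_eq_some_iff.mp h
    rw [List.getElem_map] at hx
    rw [List.getElem_range] at hx
    rw [List.length_map, List.length_range] at hlt
    exact ⟨by omega, hx.symm⟩
  · rintro ⟨hle, hx⟩
    apply List.getElem?_eq_some_iff.mpr
    refine ⟨by simp; omega, ?_⟩
    rw [List.getElem_map, List.getElem_range]
    exact hx.symm

lemma D_iff (A : List Int) : D_solve A ↔
    ∃ j < A.length, ∃ i ≤ j, psum A (j + 1) - psum A i = 1 ∧
      ∀ j' < A.length, ∀ i' ≤ j', psum A (j' + 1) - psum A i' = 1 → psum A (j' + 1) ≠ 2 →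
        j' - i' < j - i := by
  constructor
  · rintro ⟨y, hy, hy1, -, x, hx, hx2, hyx, -, hall⟩
    obtain ⟨hyn, hyv⟩ := (mem_preZ A y).mp hy
    obtain ⟨hxn, hxv⟩ := (mem_preZ A x).mp hx
    have hx1 : 1 ≤ x.2 := by omega
    refine ⟨x.2 - 1, by omega, y.2, by omega, ?_, ?_⟩
    · have h : x.2 - 1 + 1 = x.2 := by omega
      rw [h, ← hxv, ← hyv, hx2, hy1]
      norm_num
    · intro j' hj' i' hi' hval hne2
      have hp := hall (psum A (j' + 1), j' + 1)
        ((mem_preZ A _).mpr ⟨by omega, rfl⟩) hne2 (psum A i', i')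
        ((mem_preZ A _).mpr ⟨by omega, rfl⟩) (by simp; omega) (by simpa using hval)
      simp at hp
      omega
  · rintro ⟨j, hj, i, hij, hval, hall⟩
    have h2 : psum A (j + 1) = 2 := by
      by_contra h
      exact absurd (hall j hj i hij hval h) (by omega)
    have h1 : psum A i = 1 := by omega
    have hex : ∃ k, psum A k = 1 := ⟨i, h1⟩
    set f := Nat.find hex with hfdef
    have hf1 : psum A f = 1 := Nat.find_spec hex
    have hfle : f ≤ i := Nat.find_min' hex h1
    set g := Nat.findGreatest (fun k => psum A k = 2) A.length with hgdef
    have hG2 : psum A g = 2 := Nat.findGreatest_spec (P := fun k => psum A k = 2) (n := A.length) (m := j + 1) (by omega) h2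
    have hGge : j + 1 ≤ g := Nat.le_findGreatest (P := fun k => psum A k = 2) (n := A.length) (by omega) h2
    have hGle : g ≤ A.length := Nat.findGreatest_le A.length
    refine ⟨(1, f), (mem_preZ A _).mpr ⟨by omega, hf1.symm⟩, rfl, ?_, (2, g),
      (mem_preZ A _).mpr ⟨hGle, hG2.symm⟩, rfl, by show f < g; omega, ?_, ?_⟩
    · intro z hz hz1
      obtain ⟨hzn, hzv⟩ := (mem_preZ A z).mp hz
      show f ≤ z.2
      exact Nat.find_min' hex (by rw [← hzv, hz1])
    · intro z hz hz2 _
      obtain ⟨hzn, hzv⟩ := (mem_preZ A z).mp hz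
      show z.2 ≤ g
      exact Nat.le_findGreatest hzn (by rw [← hzv, hz2])
    · intro p hp hp2 q hq hqp hdiff
      obtain ⟨hpn, hpv⟩ := (mem_preZ A p).mp hp
      obtain ⟨hqn, hqv⟩ := (mem_preZ A q).mp hq
      have hp1 : 1 ≤ p.2 := by omega
      have := hall (p.2 - 1) (by omega) q.2
        (by omega)
        (by rw [show p.2 - 1 + 1 = p.2 from by omega, ← hpv, ← hqv]; exact hdiff)
        (by rw [show p.2 - 1 + 1 = p.2 from by omega, ← hpv]; exact hp2)
      show p.2 - q.2 < g - f
      omega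

-- ---- maxima of Int lists, base 0 ----
def maxOf (l : List Int) : Int := l.foldl max 0

lemma le_maxOf (l : List Int) (x : Int) (hx : x ∈ l) : x ≤ maxOf l :=
  (PySem.List.le_foldl_max l 0).2 x hx

lemma foldl_max_le (l : List Int) (b : Int) : ∀ a : Int, a ≤ b → (∀ x ∈ l, x ≤ b) → l.foldl max a ≤ b := by
  induction l with
  | nil => intro a ha _; simpa using ha
  | cons y t ih =>
      intro a ha hb
      simp only [List.foldl_cons]
      exact ih _ (max_le ha (hb y (by simp))) (fun x hx => hb x (by simp [hx]))

lemma maxOf_le (l : List Int) (b : Int) (h0 : 0 ≤ b) (hb : ∀ x ∈ l, x ≤ b) : maxOf l ≤ b :=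
  foldl_max_le l b 0 h0 hb

lemma foldl_max_mem (l : List Int) : ∀ a : Int, l.foldl max a = a ∨ l.foldl max a ∈ l := by
  induction l with
  | nil => intro a; simp
  | cons y t ih =>
      intro a
      simp only [List.foldl_cons]
      rcases ih (max a y) with h | h
      · rcases max_cases a y with ⟨he, _⟩ | ⟨he, _⟩
        · exact Or.inl (h.trans he)
        · exact Or.inr (by rw [h, he]; simp)
      · exact Or.inr (by simp [h])

lemma maxOf_eq_zero_or_mem (l : List Int) : maxOf l = 0 ∨ maxOf l ∈ l := foldl_max_mem l 0

-- ---- A-side specification: best length among pairs ending before k, ends with prefix ≠ 2 ----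
def endLensA (A : List Int) (k : Nat) : List Int :=
  if psum A (k + 1) = 2 then []
  else (List.range (k + 1)).filterMap
    (fun i => if psum A (k + 1) - psum A i = 1 then some ((k : Int) + 1 - i) else none)

def bestA (A : List Int) : Nat → Int
  | 0 => 0
  | k + 1 => max (bestA A k) (maxOf (endLensA A k))

lemma bestA_nonneg (A : List Int) (k : Nat) : 0 ≤ bestA A k := by
  induction k with
  | zero => simp [bestA]
  | succ k ih => exact le_trans ih (le_max_left _ _)

lemma bestA_le (A : List Int) (k : Nat) : bestA A k ≤ (k : Int) := by
  induction k with
  | zero => simp [bestA]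
  | succ k ih =>
      refine max_le (le_trans ih (by push_cast; omega)) ?_
      refine maxOf_le _ _ (by push_cast; omega) ?_
      intro x hx
      unfold endLensA at hx
      split at hx
      · simp at hx
      · obtain ⟨i, hi, hx⟩ := List.mem_filterMap.mp hx
        split at hx
        · simp only [Option.some.injEq] at hx
          omega
        · simp at hx

lemma mem_endLensA (A : List Int) (k : Nat) (x : Int) :
    x ∈ endLensA A k ↔
      psum A (k + 1) ≠ 2 ∧ ∃ i : Nat, i ≤ k ∧ psum A (k + 1) - psum A i = 1 ∧ x = (k : Int) + 1 - i := by
  unfold endLensA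
  split
  · rename_i h2; simp [h2]
  · rename_i h2
    simp only [List.mem_filterMap, List.mem_range]
    constructor
    · rintro ⟨i, hi, hx⟩
      split at hx
      · rename_i hc; exact ⟨h2, i, by omega, hc, by simpa using hx.symm⟩
      · simp at hx
    · rintro ⟨-, i, hi, hc, hx⟩
      exact ⟨i, by omega, by simp [hc, hx]⟩

lemma bestA_ub (A : List Int) (k i j : Nat) (hij : i ≤ j) (hjk : j < k)
    (hc : psum A (j + 1) - psum A i = 1) (h2 : psum A (j + 1) ≠ 2) :
    (j : Int) + 1 - i ≤ bestA A k := by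
  induction k with
  | zero => omega
  | succ k ih =>
      by_cases hjk' : j < k
      · exact le_trans (ih hjk') (le_max_left _ _)
      · have hj : j = k := by omega
        subst hj
        refine le_trans (le_maxOf _ _ ?_) (le_max_right _ _)
        exact (mem_endLensA A j _).mpr ⟨h2, i, hij, hc, rfl⟩

lemma bestA_attained (A : List Int) (k : Nat) :
    bestA A k = 0 ∨ ∃ i j : Nat, i ≤ j ∧ j < k ∧ psum A (j + 1) - psum A i = 1 ∧
      psum A (j + 1) ≠ 2 ∧ bestA A k = (j : Int) + 1 - i := by
  induction k with
  | zero => exact Or.inl rfl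
  | succ k ih =>
      have hstep : bestA A (k + 1) = max (bestA A k) (maxOf (endLensA A k)) := rfl
      rw [hstep]
      rcases max_cases (bestA A k) (maxOf (endLensA A k)) with ⟨he, _⟩ | ⟨he, _⟩
      · rw [he]
        rcases ih with h | ⟨i, j, h1, h2, h3, h4, h5⟩
        · exact Or.inl h
        · exact Or.inr ⟨i, j, h1, by omega, h3, h4, h5⟩
      · rw [he]
        rcases maxOf_eq_zero_or_mem (endLensA A k) with h | h
        · exact Or.inl h
        · obtain ⟨h2, i, hi, hc, hx⟩ := (mem_endLensA A k _).mp h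
          exact Or.inr ⟨i, k, hi, by omega, hc, h2, hx⟩

-- ---- A-side loop invariant: the hash maps v ≠ 1 to the first index with prefix v ----
def firstIdx (A : List Int) (k : Nat) (v : Int) : Option Nat :=
  (List.range k).find? (fun t => psum A (t + 1) == v)

def hspec (A : List Int) (k : Nat) (v : Int) : Option Int :=
  if v = 1 then none else (firstIdx A k v).map (fun t => (t : Int))

lemma firstIdx_zero (A : List Int) (v : Int) : firstIdx A 0 v = none := rfl

lemma firstIdx_succ (A : List Int) (k : Nat) (v : Int) :
    firstIdx A (k + 1) v = (firstIdx A k v).or (if psum A (k + 1) = v then some k else none) := by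
  unfold firstIdx
  rw [List.range_succ, List.find?_append]
  congr 1
  by_cases h : psum A (k + 1) = v
  · simp [List.find?, h]
  · have hb : (psum A (k + 1) == v) = false := by simp [h]
    simp [List.find?, hb, h]

lemma firstIdx_some (A : List Int) (k : Nat) (v : Int) (t : Nat) (h : firstIdx A k v = some t) :
    t < k ∧ psum A (t + 1) = v ∧ ∀ u < t, psum A (u + 1) ≠ v := by
  induction k with
  | zero => simp [firstIdx_zero] at h
  | succ k ih =>
      rw [firstIdx_succ] at h
      cases hf : firstIdx A k v with
      | some t' =>
          rw [hf] at h
          simp only [Option.some_or] at h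
          injection h with h
          subst h
          obtain ⟨h1, h2, h3⟩ := ih hf
          exact ⟨by omega, h2, h3⟩
      | none =>
          rw [hf] at h
          simp only [Option.none_or] at h
          have hall : ∀ u < k, psum A (u + 1) ≠ v := by
            intro u hu
            have := List.find?_eq_none.mp hf u (List.mem_range.mpr hu)
            simpa using this
          split at h
          · rename_i hv
            cases h
            exact ⟨by omega, hv, hall⟩
          · simp at h

lemma firstIdx_none (A : List Int) (k : Nat) (v : Int) (h : firstIdx A k v = none) :
    ∀ u < k, psum A (u + 1) ≠ v := by
  intro u hu
  have := List.find?_eq_none.mp h u (List.mem_range.mpr hu)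
  simpa using this

lemma bestA_succ_of_one (A : List Int) (k : Nat) (hone : psum A (k + 1) = 1) :
    bestA A (k + 1) = (k : Int) + 1 := by
  have hmem : ((k : Int) + 1) ∈ endLensA A k :=
    (mem_endLensA A k _).mpr ⟨by rw [hone]; norm_num, 0, Nat.zero_le _, by rw [psum_zero]; omega, by norm_num⟩
  have hge := le_maxOf _ _ hmem
  have hle : maxOf (endLensA A k) ≤ (k : Int) + 1 := by
    refine maxOf_le _ _ (by omega) ?_
    intro x hx
    obtain ⟨-, i, hi, -, hxv⟩ := (mem_endLensA A k x).mp hx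
    omega
  have hA := bestA_le A k
  have hr : bestA A (k + 1) = max (bestA A k) (maxOf (endLensA A k)) := rfl
  rw [hr, max_def]
  split_ifs <;> omega

lemma bestA_succ_of_two (A : List Int) (k : Nat) (h2 : psum A (k + 1) = 2) :
    bestA A (k + 1) = bestA A k := by
  have hr : bestA A (k + 1) = max (bestA A k) (maxOf (endLensA A k)) := rfl
  have he : endLensA A k = [] := by unfold endLensA; rw [if_pos h2]
  rw [hr, he]
  exact max_eq_left (bestA_nonneg A k)

lemma bestA_succ_of_none (A : List Int) (k : Nat) (hone : psum A (k + 1) ≠ 1)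
    (hfi : firstIdx A (k + 1) (psum A (k + 1) - 1) = none) :
    bestA A (k + 1) = bestA A k := by
  have he : endLensA A k = [] := by
    rw [List.eq_nil_iff_forall_not_mem]
    intro x hx
    obtain ⟨-, i, hi, hc, -⟩ := (mem_endLensA A k x).mp hx
    have hpi : psum A i = psum A (k + 1) - 1 := by omega
    rcases Nat.eq_zero_or_pos i with h0 | h0
    · rw [h0, psum_zero] at hpi; omega
    · have := firstIdx_none A (k + 1) _ hfi (i - 1) (by omega)
      rw [show i - 1 + 1 = i from by omega] at this
      exact this hpi
  have hr : bestA A (k + 1) = max (bestA A k) (maxOf (endLensA A k)) := rfl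
  rw [hr, he]
  exact max_eq_left (bestA_nonneg A k)

lemma bestA_succ_of_some (A : List Int) (k t : Nat) (hone : psum A (k + 1) ≠ 1)
    (h2 : psum A (k + 1) ≠ 2) (hfi : firstIdx A (k + 1) (psum A (k + 1) - 1) = some t) :
    bestA A (k + 1) = max (bestA A k) ((k : Int) - t) := by
  obtain ⟨ht, hpt, hmin⟩ := firstIdx_some A (k + 1) _ t hfi
  have htk : t < k := by
    rcases Nat.lt_or_ge t k with h | h
    · exact h
    · exfalso; have : t = k := by omega
      rw [this] at hpt; omega
  have hmem : ((k : Int) - t) ∈ endLensA A k := by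
    refine (mem_endLensA A k _).mpr ⟨h2, t + 1, by omega, by rw [hpt]; ring, by push_cast; ring⟩
  have hge := le_maxOf _ _ hmem
  have hle : maxOf (endLensA A k) ≤ (k : Int) - t := by
    refine maxOf_le _ _ (by omega) ?_
    intro x hx
    obtain ⟨-, i, hi, hc, hxv⟩ := (mem_endLensA A k x).mp hx
    have hpi : psum A i = psum A (k + 1) - 1 := by omega
    rcases Nat.eq_zero_or_pos i with h0 | h0
    · rw [h0, psum_zero] at hpi; omega
    · have hit : ¬ (i - 1 < t) := by
        intro hlt
        have := hmin (i - 1) hlt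
        rw [show i - 1 + 1 = i from by omega] at this
        exact this hpi
      omega
  have hr : bestA A (k + 1) = max (bestA A k) (maxOf (endLensA A k)) := rfl
  rw [hr]
  congr 1
  omega

lemma hspec_succ_of_one (A : List Int) (k : Nat) (hone : psum A (k + 1) = 1) (v : Int) :
    hspec A (k + 1) v = hspec A k v := by
  unfold hspec
  split
  · rfl
  · rename_i hv
    rw [firstIdx_succ, if_neg (by intro hc; exact hv (by omega)), Option.or_none]

lemma hspec_succ_of_ne (A : List Int) (k : Nat) (v : Int)
    (hv : v ≠ psum A (k + 1)) : hspec A (k + 1) v = hspec A k v := by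
  unfold hspec
  split
  · rfl
  · rw [firstIdx_succ, if_neg (by omega), Option.or_none]

lemma hinsert_inv (A : List Int) (k : Nat) (h : PySem.Dict Int Int)
    (hone : psum A (k + 1) ≠ 1)
    (hinv : ∀ v : Int, PySem.Dict.get? h v = hspec A k v) (v : Int) :
    PySem.Dict.get?
      (if PySem.Dict.get? h (psum A (k + 1)) = none then h.insert (psum A (k + 1)) (k : Int) else h) v
      = hspec A (k + 1) v := by
  by_cases hvs : v = psum A (k + 1)
  · rw [hvs]
    cases hget : PySem.Dict.get? h (psum A (k + 1)) with
    | none =>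
        rw [if_pos rfl, PySem.Dict.get?_insert_self]
        have hfi : firstIdx A k (psum A (k + 1)) = none := by
          have := (hinv (psum A (k + 1))).symm.trans hget
          unfold hspec at this
          rw [if_neg hone] at this
          cases hfi : firstIdx A k (psum A (k + 1)) with
          | none => rfl
          | some t => rw [hfi] at this; simp at this
        unfold hspec
        rw [if_neg hone, firstIdx_succ, hfi, if_pos rfl, Option.none_or]
        rfl
    | some l =>
        rw [if_neg (by simp), hget]
        have hfi : ∃ t : Nat, firstIdx A k (psum A (k + 1)) = some t ∧ l = (t : Int) := by
          have := (hinv (psum A (k + 1))).symm.trans hget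
          unfold hspec at this
          rw [if_neg hone] at this
          cases hfi : firstIdx A k (psum A (k + 1)) with
          | none => rw [hfi] at this; simp at this
          | some t => rw [hfi] at this; simp at this; exact ⟨t, rfl, this.symm⟩
        obtain ⟨t, hfi, hl⟩ := hfi
        unfold hspec
        rw [if_neg hone, firstIdx_succ, hfi, Option.some_or, hl]
        rfl
  · rw [hspec_succ_of_ne A k v hvs, ← hinv v]
    split
    · rw [PySem.Dict.get?_insert_of_ne _ _ hvs]
    · rfl

lemma a_loop (A : List Int) : ∀ (d k : Nat) (h : PySem.Dict Int Int) (m : Int),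
    k + d = A.length →
    (∀ v : Int, PySem.Dict.get? h v = hspec A k v) →
    m = bestA A k →
    ((PySem.List.enumerate (A.drop k) (k : Int)).foldl solveStep (psum A k, h, m)).2.2
      = bestA A A.length := by
  intro d
  induction d with
  | zero =>
      intro k h m hd hinv hm
      have hk : k = A.length := by omega
      subst hk
      rw [List.drop_length]
      simpa [PySem.List.enumerate] using hm
  | succ d ih =>
      intro k h m hd hinv hm
      have hk : k < A.length := by omega
      rw [List.drop_eq_getElem_cons hk, PySem.List.enumerate_cons, List.foldl_cons]
      have hps : (if A[k] = 0 then psum A k - 1 else psum A k + 1) = psum A (k + 1) := by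
        rw [psum_succ A k hk]
        have : A.getD k 0 = A[k] := by
          simp [List.getD_eq_getElem?_getD, List.getElem?_eq_getElem hk]
        rw [this]
        split <;> ring
      have hcast : (k : Int) + 1 = ((k + 1 : Nat) : Int) := by push_cast; ring
      by_cases hone : psum A (k + 1) = 1
      · have hstep : solveStep (psum A k, h, m) ((k : Int), A[k])
            = (psum A (k + 1), h, (k : Int) + 1) := by
          unfold solveStep
          simp only
          rw [hps, if_pos hone]
        rw [hstep]
        rw [hcast]
        exact ih (k + 1) h _ (by omega)
          (fun v => (hinv v).trans (hspec_succ_of_one A k hone v).symm)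
          (by rw [← hcast, bestA_succ_of_one A k hone])
      · have hstep : solveStep (psum A k, h, m) ((k : Int), A[k])
            = (psum A (k + 1),
               (if PySem.Dict.get? h (psum A (k + 1)) = none
                then h.insert (psum A (k + 1)) (k : Int) else h),
               match PySem.Dict.get?
                  (if PySem.Dict.get? h (psum A (k + 1)) = none
                   then h.insert (psum A (k + 1)) (k : Int) else h) (psum A (k + 1) - 1) with
               | some l => max m ((k : Int) - l)
               | none => m) := by
          unfold solveStep
          simp only
          rw [hps, if_neg hone]
          cases (if PySem.Dict.get? h (psum A (k + 1)) = none
              then h.insert (psum A (k + 1)) (k : Int) else h).get? (psum A (k + 1) - 1) <;> rfl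
        rw [hstep]
        have hinvH := hinsert_inv A k h hone hinv
        have hlook := hinvH (psum A (k + 1) - 1)
        by_cases h2 : psum A (k + 1) = 2
        · have : hspec A (k + 1) (psum A (k + 1) - 1) = none := by
            unfold hspec; rw [if_pos (by omega)]
          rw [hlook.trans this]
          rw [hcast]
          exact ih (k + 1) _ _ (by omega) hinvH (by rw [hm, bestA_succ_of_two A k h2])
        · have hne1 : psum A (k + 1) - 1 ≠ 1 := by omega
          cases hfi : firstIdx A (k + 1) (psum A (k + 1) - 1) with
          | none =>
              have : hspec A (k + 1) (psum A (k + 1) - 1) = none := by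
                unfold hspec; rw [if_neg hne1, hfi]; rfl
              rw [hlook.trans this]
              rw [hcast]
              exact ih (k + 1) _ _ (by omega) hinvH
                (by rw [hm, bestA_succ_of_none A k hone hfi])
          | some t =>
              have : hspec A (k + 1) (psum A (k + 1) - 1) = some (t : Int) := by
                unfold hspec; rw [if_neg hne1, hfi]; rfl
              rw [hlook.trans this]
              rw [hcast]
              exact ih (k + 1) _ _ (by omega) hinvH
                (by rw [hm, bestA_succ_of_some A k t hone h2 hfi])

lemma solve_eq_bestA (A : List Int) : solve A = bestA A A.length := by
  have h0 : ∀ v : Int, PySem.Dict.get? (PySem.Dict.empty : PySem.Dict Int Int) v = hspec A 0 v := by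
    intro v
    rw [PySem.Dict.get?_empty]
    unfold hspec
    split
    · rfl
    · rw [firstIdx_zero]; rfl
  have := a_loop A A.length 0 PySem.Dict.empty 0 (by omega) h0 rfl
  simpa [solve, psum_zero] using this

-- ---- B-side loop characterisation ----
lemma inner_char (A : List Int) (i : Nat) :
    ∀ (d j : Nat) (b : Int), j + d = A.length → i ≤ j →
    (((PySem.List.pyRange (j : Int) (A.length : Int) 1).foldl (stepJ A (i : Int))
        (psum A j - psum A i, b)).2 = b ∨
      ∃ e : Nat, i ≤ e ∧ e < A.length ∧ psum A (e + 1) - psum A i = 1 ∧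
        ((PySem.List.pyRange (j : Int) (A.length : Int) 1).foldl (stepJ A (i : Int))
          (psum A j - psum A i, b)).2 = (e : Int) + 1 - i) ∧
    b ≤ ((PySem.List.pyRange (j : Int) (A.length : Int) 1).foldl (stepJ A (i : Int))
          (psum A j - psum A i, b)).2 ∧
    (∀ e : Nat, j ≤ e → e < A.length → psum A (e + 1) - psum A i = 1 →
      (e : Int) + 1 - i ≤ ((PySem.List.pyRange (j : Int) (A.length : Int) 1).foldl
        (stepJ A (i : Int)) (psum A j - psum A i, b)).2) := by
  intro d
  induction d with
  | zero =>
      intro j b hd hij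
      rw [PySem.List.pyRange_one_eq_nil (by omega)]
      refine ⟨Or.inl rfl, le_refl _, ?_⟩
      intro e he hel
      omega
  | succ d ih =>
      intro j b hd hij
      have hjlt : j < A.length := by omega
      rw [PySem.List.pyRange_one_cons (by exact_mod_cast hjlt)]
      rw [List.foldl_cons]
      have hs : stepJ A (i : Int) (psum A j - psum A i, b) (j : Int)
          = (psum A (j + 1) - psum A i,
             if psum A (j + 1) - psum A i = 1 then max b ((j : Int) - i + 1) else b) := by
        unfold stepJ
        simp only
        rw [PySem.List.pyGetD_natCast]
        have harith : psum A j - psum A i + (if A.getD j 0 = 0 then -1 else 1)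
            = psum A (j + 1) - psum A i := by
          rw [psum_succ A j hjlt]; ring
        rw [harith]
      rw [hs]
      have hcast : (j : Int) + 1 = ((j + 1 : Nat) : Int) := by push_cast; ring
      rw [hcast]
      obtain ⟨hatt, hmono, hub⟩ := ih (j + 1)
        (if psum A (j + 1) - psum A i = 1 then max b ((j : Int) - i + 1) else b)
        (by omega) (by omega)
      refine ⟨?_, ?_, ?_⟩
      · rcases hatt with hr | ⟨e, he1, he2, he3, he4⟩
        · rw [hr]
          by_cases hc : psum A (j + 1) - psum A i = 1
          · rw [if_pos hc]
            rcases max_cases b ((j : Int) - i + 1) with ⟨he, _⟩ | ⟨he, _⟩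
            · exact Or.inl he
            · exact Or.inr ⟨j, hij, hjlt, hc, by omega⟩
          · rw [if_neg hc]
            exact Or.inl rfl
        · exact Or.inr ⟨e, he1, he2, he3, he4⟩
      · refine le_trans ?_ hmono
        split
        · exact le_max_left _ _
        · exact le_refl _
      · intro e he1 he2 he3
        rcases Nat.eq_or_lt_of_le he1 with he | he
        · rw [← he] at he3 ⊢
          refine le_trans ?_ hmono
          rw [if_pos he3]
          have := le_max_right b ((j : Int) - i + 1)
          omega
        · exact hub e (by omega) he2 he3

lemma outer_char (A : List Int) :
    ∀ (d i : Nat) (b : Int), i + d = A.length →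
    (((PySem.List.pyRange (i : Int) (A.length : Int) 1).foldl
        (fun maxLen i => ((PySem.List.pyRange i (A.length : Int) 1).foldl (stepJ A i) (0, maxLen)).2) b)
        = b ∨
      ∃ p q : Nat, p ≤ q ∧ q < A.length ∧ psum A (q + 1) - psum A p = 1 ∧
        ((PySem.List.pyRange (i : Int) (A.length : Int) 1).foldl
          (fun maxLen i => ((PySem.List.pyRange i (A.length : Int) 1).foldl (stepJ A i) (0, maxLen)).2) b)
          = (q : Int) + 1 - p) ∧
    b ≤ ((PySem.List.pyRange (i : Int) (A.length : Int) 1).foldl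
          (fun maxLen i => ((PySem.List.pyRange i (A.length : Int) 1).foldl (stepJ A i) (0, maxLen)).2) b) ∧
    (∀ p q : Nat, i ≤ p → p ≤ q → q < A.length → psum A (q + 1) - psum A p = 1 →
      (q : Int) + 1 - p ≤ ((PySem.List.pyRange (i : Int) (A.length : Int) 1).foldl
          (fun maxLen i => ((PySem.List.pyRange i (A.length : Int) 1).foldl (stepJ A i) (0, maxLen)).2) b)) := by
  intro d
  induction d with
  | zero =>
      intro i b hd
      rw [PySem.List.pyRange_one_eq_nil (by omega)]
      refine ⟨Or.inl rfl, le_refl _, ?_⟩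
      intro p q h1 h2 h3
      omega
  | succ d ih =>
      intro i b hd
      have hilt : i < A.length := by omega
      rw [PySem.List.pyRange_one_cons (by exact_mod_cast hilt)]
      rw [List.foldl_cons]
      have hzero : (0 : Int) = psum A i - psum A i := by ring
      obtain ⟨iatt, imono, iub⟩ := inner_char A i (A.length - i) i b (by omega) (le_refl i)
      rw [← hzero] at iatt imono iub
      have hcast : (i : Int) + 1 = ((i + 1 : Nat) : Int) := by push_cast; ring
      rw [hcast]
      obtain ⟨hatt, hmono, hub⟩ := ih (i + 1)
        (((PySem.List.pyRange (i : Int) (A.length : Int) 1).foldl (stepJ A (i : Int)) (0, b)).2)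
        (by omega)
      refine ⟨?_, ?_, ?_⟩
      · rcases hatt with hr | ⟨p, q, h1, h2, h3, h4⟩
        · rw [hr]
          rcases iatt with hr' | ⟨e, he1, he2, he3, he4⟩
          · exact Or.inl hr'
          · exact Or.inr ⟨i, e, he1, he2, he3, he4⟩
        · exact Or.inr ⟨p, q, h1, h2, h3, h4⟩
      · exact le_trans imono hmono
      · intro p q h1 h2 h3 h4
        rcases Nat.eq_or_lt_of_le h1 with he | he
        · rw [← he] at h4 ⊢
          exact le_trans (iub q (he ▸ h2) h3 h4) hmono
        · exact hub p q (by omega) h2 h3 h4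

lemma alt_char (A : List Int) :
    (solve_alt A = 0 ∨
      ∃ p q : Nat, p ≤ q ∧ q < A.length ∧ psum A (q + 1) - psum A p = 1 ∧
        solve_alt A = (q : Int) + 1 - p) ∧
    0 ≤ solve_alt A ∧
    (∀ p q : Nat, p ≤ q → q < A.length → psum A (q + 1) - psum A p = 1 →
      (q : Int) + 1 - p ≤ solve_alt A) := by
  have h := outer_char A A.length 0 0 (by omega)
  simp only [Nat.cast_zero] at h
  refine ⟨h.1, h.2.1, fun p q h1 h2 h3 => h.2.2 p q (by omega) h1 h2 h3⟩

-- ===== VERDICT (by name: the statement is the Claim_ definition above) =====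
theorem solve_spec : Claim_unchanged_solve := by
  intro A _ hD
  rw [solve_eq_bestA]
  obtain ⟨haat, hanon, haub⟩ := alt_char A
  apply le_antisymm
  · rcases bestA_attained A A.length with h | ⟨i, j, h1, h2, h3, _, h5⟩
    · rw [h]; exact hanon
    · rw [h5]; exact haub i j h1 h2 h3
  · rcases haat with h | ⟨p, q, h1, h2, h3, h4⟩
    · rw [h]; exact bestA_nonneg A _
    · rw [h4]
      by_cases h2q : psum A (q + 1) = 2
      · rw [D_iff] at hD
        push_neg at hD
        obtain ⟨j', hj', i', hi', hc', h2', hlen⟩ := hD q h2 p h1 h3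
        have := bestA_ub A _ i' j' hi' hj' hc' h2'
        omega
      · exact bestA_ub A _ p q h1 h2 h3 h2q

theorem solve_changed : Claim_changed_solve := by unfold Claim_changed_solve; decide

theorem solve_tight : Claim_exact_solve := by
  intro A _ hD
  obtain ⟨j, hj, i, hij, hc, hall⟩ := (D_iff A).mp hD
  obtain ⟨haat, hanon, haub⟩ := alt_char A
  have halt : (j : Int) + 1 - i ≤ solve_alt A := haub i j hij hj hc
  have hsolve : solve A < (j : Int) + 1 - i := by
    rw [solve_eq_bestA]
    rcases bestA_attained A A.length with h | ⟨i', j', h1, h2', h3, h4, h5⟩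
    · rw [h]; omega
    · rw [h5]
      have := hall j' h2' i' h1 h3 h4
      omega
  omega
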